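-- pv_equiv track=rewrite | github.com/bharathkumarmani/pythonProgram | BasicPythonProgram/FirstLetterOfEveryWord.py | firstletterofeveryword
-- ===== SOURCE A (Python) =====
-- def firstletterofeveryword(text):
--     result=""
--     v = True
--     for i in range(len(text)):
--         if(text[i]==" "):
--             v = True
--         elif(text[i] != " " and v==True):
--             result += text[i]
--             v=False
--     return result
-- ===== SOURCE B (Python) =====
-- def firstletterofeveryword(text):
--     return "".join(w[0] for w in text.split(" ") if w)
-- ===== Notes on version B (the rewrite author's own statement) =====
-- stated objective: idiomatic
-- what changed: Replaces the index loop with a word-boundary flag by a single-space split into tokens and a join of the first character of each non-empty token.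
import Mathlib
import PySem

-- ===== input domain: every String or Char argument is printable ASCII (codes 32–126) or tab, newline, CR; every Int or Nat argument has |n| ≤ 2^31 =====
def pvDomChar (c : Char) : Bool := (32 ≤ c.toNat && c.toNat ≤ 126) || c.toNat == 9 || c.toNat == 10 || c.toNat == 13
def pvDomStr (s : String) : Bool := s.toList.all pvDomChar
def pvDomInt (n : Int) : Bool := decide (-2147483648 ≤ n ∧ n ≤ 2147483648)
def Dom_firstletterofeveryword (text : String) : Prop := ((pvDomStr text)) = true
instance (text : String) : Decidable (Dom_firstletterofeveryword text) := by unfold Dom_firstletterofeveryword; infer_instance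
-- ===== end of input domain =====

-- B replaces A's char-by-char scan with a boundary flag by split(" ") + join of first letters (idiomatic; return value only).


-- ===== PORT A =====
-- result accumulated as a List Char, state (result, v); loop over the characters in index order
def firstletterofeveryword (text : String) : String :=
  let st := text.toList.foldl
    (fun (st : List Char × Bool) c =>
      if c == ' ' then (st.1, true)
      else if c != ' ' && st.2 then (st.1 ++ [c], false)
      else st)
    ([], true)
  String.mk st.1

-- ===== PORT B =====
-- text.split(" ") ported as List.splitOn ' ' (exact for a one-character separator); w[0] of each non-empty token
def firstletterofeveryword_alt (text : String) : String :=
  String.mk ((text.toList.splitOn ' ').filterMap List.head?)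

-- ===== PRECONDITION & SPEC =====
def Spec_firstletterofeveryword (text : String) (out : String) : Prop := out = firstletterofeveryword_alt text
instance (text : String) (out : String) : Decidable (Spec_firstletterofeveryword text out) := by unfold Spec_firstletterofeveryword; infer_instance

-- ===== CLAIM (what is proved, stated in full; the proofs are below) =====
def Claim_equal_firstletterofeveryword : Prop := ∀ (text : String), Dom_firstletterofeveryword text → Spec_firstletterofeveryword text (firstletterofeveryword text)

-- ===== LEMMAS AND PROOFS =====

-- reference function: the first letters of the words of cs, given the in-word flag v (v = true: next non-space char starts a word)
def pvFirsts (v : Bool) : List Char → List Char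
  | [] => []
  | c :: cs => if c = ' ' then pvFirsts true cs
               else if v then c :: pvFirsts false cs
               else pvFirsts false cs

theorem pvFoldA_eq (cs : List Char) : ∀ (acc : List Char) (v : Bool),
    (cs.foldl (fun (st : List Char × Bool) c =>
      if c == ' ' then (st.1, true)
      else if c != ' ' && st.2 then (st.1 ++ [c], false)
      else st) (acc, v)).1 = acc ++ pvFirsts v cs := by
  induction cs with
  | nil => intro acc v; simp [pvFirsts]
  | cons c cs ih =>
    intro acc v
    rw [List.foldl_cons]
    by_cases hc : c = ' '
    · rw [if_pos (by simp [hc]), ih]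
      simp [pvFirsts, hc]
    · cases v
      · rw [if_neg (by simp [hc]), if_neg (by simp), ih]
        simp [pvFirsts, hc]
      · rw [if_neg (by simp [hc]), if_pos (by simp [hc]), ih]
        simp [pvFirsts, hc]

theorem pvSplit_eq (cs : List Char) :
    ((cs.splitOnP (· == ' ')).filterMap List.head? = pvFirsts true cs) ∧
    ((cs.splitOnP (· == ' ')).tail.filterMap List.head? = pvFirsts false cs) := by
  induction cs with
  | nil => simp [List.splitOnP_nil, pvFirsts]
  | cons c cs ih =>
    rw [List.splitOnP_cons]
    by_cases hc : c = ' '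
    · rw [if_pos (by simp [hc])]
      refine ⟨?_, ?_⟩
      · simpa [pvFirsts, hc] using ih.1
      · simpa [pvFirsts, hc] using ih.1
    · obtain ⟨h, t, hht⟩ : ∃ h t, cs.splitOnP (· == ' ') = h :: t := by
        cases hst : cs.splitOnP (· == ' ') with
        | nil => exact absurd hst (List.splitOnP_ne_nil _ _)
        | cons h t => exact ⟨h, t, rfl⟩
      have h2 := ih.2
      rw [hht] at h2 ⊢
      simp only [List.tail_cons] at h2
      simp [hc, pvFirsts, List.modifyHead, h2]

-- ===== VERDICT (by name: the statement is the Claim_ definition above) =====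
theorem firstletterofeveryword_spec : Claim_equal_firstletterofeveryword := by
  intro text _
  unfold Spec_firstletterofeveryword firstletterofeveryword firstletterofeveryword_alt
  simp only [List.splitOn, (pvSplit_eq text.toList).1, pvFoldA_eq, List.nil_append]
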